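-- pv_equiv track=rewrite | github.com/luyizhou4/espnet | egs/codeswitching/asr/local_yzl23/text_norm/generate_espnet_json_moe.py | get_lidcp_label_ids
-- ===== SOURCE A (Python) =====
-- def get_lidcp_label_ids(label_ids, divider, lid_tokens):
--     ''' Given label ids, return lid_change_point label_ids
--         e.g. "english words 中 文" ==> "english words <CP> 中 文"
--         :param label_ids: list of int, label tokens
--         :param divider: unk token id, used as a divider
--         :lid_tokens: <CP> token id
--     '''
--     assert divider > 0
--     assert lid_tokens > 0
--     # for empty utterance, directly return
--     if len(label_ids) == 0:
--         return label_ids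
--
--     out_label_ids = []
--     for index, label_token in enumerate(label_ids):
--         lang_state = 0 if label_token < divider else 1
--         # check if it's time to emit language tokens
--         if index == len(label_ids)-1: # avoid index+1 out of range
--             emit_status = False
--         elif bool(label_token // divider) != bool(label_ids[index+1] // divider):
--             emit_status = True
--         else:
--             emit_status = False
--
--         if emit_status:
--             out_label_ids.extend([label_token, lid_tokens])
--         else:
--             out_label_ids.append(label_token)
--
--     return out_label_ids
-- ===== SOURCE B (Python) =====
-- def get_lidcp_label_ids(label_ids, divider, lid_tokens):
--     ''' Run-based reimplementation: group label_ids into maximal runs of equal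
--         language side (side = bool(token // divider)), then join the runs with
--         lid_tokens as the separator. '''
--     assert divider > 0
--     assert lid_tokens > 0
--     if len(label_ids) == 0:
--         return label_ids
--     runs = []
--     cur = [label_ids[0]]
--     cur_side = bool(label_ids[0] // divider)
--     for tok in label_ids[1:]:
--         side = bool(tok // divider)
--         if side == cur_side:
--             cur.append(tok)
--         else:
--             runs.append(cur)
--             cur = [tok]
--             cur_side = side
--     runs.append(cur)
--     out = list(runs[0])
--     for run in runs[1:]:
--         out.append(lid_tokens)
--         out.extend(run)
--     return out
-- ===== Notes on version B (the rewrite author's own statement) =====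
-- stated objective: alternative
-- what changed: Replaces A's per-index lookahead loop (comparing label_ids[i] with label_ids[i+1] and emitting per token) by a two-phase run-based algorithm: group tokens into maximal runs of equal language side, then join the runs with lid_tokens as separator.
import Mathlib
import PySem

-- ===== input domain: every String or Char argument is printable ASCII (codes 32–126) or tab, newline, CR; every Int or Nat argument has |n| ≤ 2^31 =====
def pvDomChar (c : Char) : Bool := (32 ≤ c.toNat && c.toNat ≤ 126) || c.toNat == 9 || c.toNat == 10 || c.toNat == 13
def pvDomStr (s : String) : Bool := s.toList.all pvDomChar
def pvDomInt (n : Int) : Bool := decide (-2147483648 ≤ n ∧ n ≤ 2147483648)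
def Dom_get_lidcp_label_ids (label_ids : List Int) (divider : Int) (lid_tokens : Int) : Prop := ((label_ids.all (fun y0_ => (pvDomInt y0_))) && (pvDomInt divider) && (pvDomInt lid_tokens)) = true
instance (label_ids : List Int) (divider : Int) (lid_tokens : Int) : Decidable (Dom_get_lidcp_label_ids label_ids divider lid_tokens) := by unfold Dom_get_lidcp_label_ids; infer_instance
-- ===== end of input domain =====

-- B interleaves lid_tokens between maximal runs of equal language side instead of
-- A's per-index lookahead emit; return value equivalence, proved on Pre_ (both asserts hold).

-- bool(t // divider): the language side of a token (shared transliteration of 'bool(x // divider)')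
def pvSide (divider t : Int) : Bool := decide (PySem.Int.floordiv t divider ≠ 0)

-- ===== PORT A =====
-- one loop step: emit [tok, lid_tokens] when the next token's side differs, else [tok]
def pvAStep (label_ids : List Int) (divider lid_tokens : Int) (out : List Int) (p : Int × Int) : List Int :=
  let emit : Bool :=
    if p.1 = (label_ids.length : Int) - 1 then false
    else pvSide divider p.2 != pvSide divider (PySem.List.pyGetD label_ids (p.1 + 1) 0)
  if emit then out ++ [p.2, lid_tokens] else out ++ [p.2]

def get_lidcp_label_ids (label_ids : List Int) (divider : Int) (lid_tokens : Int) : List Int :=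
  if label_ids.length = 0 then label_ids
  else (PySem.List.enumerate label_ids 0).foldl (pvAStep label_ids divider lid_tokens) []

-- ===== PORT B =====
-- run builder: group the tail into maximal runs of equal side (cur is the open run, s its side)
def pvBRuns (divider : Int) (s : Bool) (cur : List Int) : List Int → List (List Int)
  | [] => [cur]
  | t :: ts =>
    if pvSide divider t == s then pvBRuns divider s (cur ++ [t]) ts
    else cur :: pvBRuns divider (pvSide divider t) [t] ts

def get_lidcp_label_ids_alt (label_ids : List Int) (divider : Int) (lid_tokens : Int) : List Int :=
  match label_ids with
  | [] => label_ids
  | t :: ts =>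
    match pvBRuns divider (pvSide divider t) [t] ts with
    | [] => []   -- unreachable: pvBRuns never returns []
    | r :: rs => rs.foldl (fun out run => out ++ lid_tokens :: run) r

-- ===== PRECONDITION & SPEC =====
-- Pre_: exactly A's two asserts; on divider ≤ 0 or lid_tokens ≤ 0 the Python raises AssertionError.
def Pre_get_lidcp_label_ids (_label_ids : List Int) (divider : Int) (lid_tokens : Int) : Prop :=
  divider > 0 ∧ lid_tokens > 0
instance (label_ids : List Int) (divider : Int) (lid_tokens : Int) : Decidable (Pre_get_lidcp_label_ids label_ids divider lid_tokens) := by unfold Pre_get_lidcp_label_ids; infer_instance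

def pvWitness_get_lidcp_label_ids : List Int × Int × Int := ([1, 5, 2, 7], 3, 9)

def Spec_get_lidcp_label_ids (label_ids : List Int) (divider : Int) (lid_tokens : Int) (out : List Int) : Prop := out = get_lidcp_label_ids_alt label_ids divider lid_tokens
instance (label_ids : List Int) (divider : Int) (lid_tokens : Int) (out : List Int) : Decidable (Spec_get_lidcp_label_ids label_ids divider lid_tokens out) := by unfold Spec_get_lidcp_label_ids; infer_instance

-- ===== CLAIM (what is proved, stated in full; the proofs are below) =====
def Claim_equal_get_lidcp_label_ids : Prop := ∀ (label_ids : List Int) (divider : Int) (lid_tokens : Int), Dom_get_lidcp_label_ids label_ids divider lid_tokens → Pre_get_lidcp_label_ids label_ids divider lid_tokens → Spec_get_lidcp_label_ids label_ids divider lid_tokens (get_lidcp_label_ids label_ids divider lid_tokens)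

-- ===== LEMMAS AND PROOFS =====

-- common spec: output for the tail given the side s of the previous token
def pvGoTail (divider lid_tokens : Int) (s : Bool) : List Int → List Int
  | [] => []
  | u :: us => (if pvSide divider u != s then [lid_tokens, u] else [u]) ++ pvGoTail divider lid_tokens (pvSide divider u) us

theorem pvBRuns_ne_nil (divider : Int) (s : Bool) (cur : List Int) (ts : List Int) :
    pvBRuns divider s cur ts ≠ [] := by
  induction ts generalizing s cur with
  | nil => simp [pvBRuns]
  | cons t ts ih => simp only [pvBRuns]; split <;> simp [ih]

-- the run list flattened with separators equals cur ++ pvGoTail s ts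
theorem pvBRuns_join (divider lid_tokens : Int) (ts : List Int) (s : Bool) (cur : List Int) :
    (match pvBRuns divider s cur ts with
     | [] => []
     | r :: rs => r ++ rs.flatMap (fun run => lid_tokens :: run)) =
      cur ++ pvGoTail divider lid_tokens s ts := by
  induction ts generalizing s cur with
  | nil => simp [pvBRuns, pvGoTail]
  | cons t ts ih =>
    simp only [pvBRuns]
    by_cases h : pvSide divider t = s
    · simp only [beq_self_eq_true, if_true, ih, pvGoTail, h]
      simp
    · have hb : (pvSide divider t == s) = false := by simp [h]
      simp only [hb, Bool.false_eq_true, if_false]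
      rcases hr : pvBRuns divider (pvSide divider t) [t] ts with _ | ⟨r, rs⟩
      · exact absurd hr (pvBRuns_ne_nil _ _ _ _)
      · have := ih (pvSide divider t) [t]
        rw [hr] at this
        simp only [List.flatMap_cons, pvGoTail]
        have hne : (pvSide divider t != s) = true := by simp [h]
        rw [hne]
        simp at this ⊢
        rw [this]

-- A's per-token output as direct recursion on the list
def pvGoA (divider lid_tokens : Int) : List Int → List Int
  | [] => []
  | [t] => [t]
  | t :: u :: us =>
    (if pvSide divider u != pvSide divider t then [t, lid_tokens] else [t]) ++
      pvGoA divider lid_tokens (u :: us)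

theorem pvGoA_eq_goTail (divider lid_tokens : Int) (t : Int) (ts : List Int) :
    pvGoA divider lid_tokens (t :: ts) = t :: pvGoTail divider lid_tokens (pvSide divider t) ts := by
  induction ts generalizing t with
  | nil => simp [pvGoA, pvGoTail]
  | cons u us ih =>
    simp only [pvGoA, pvGoTail, ih u]
    by_cases h : pvSide divider u = pvSide divider t <;> simp [h]

-- A's foldl over the enumerated suffix equals acc ++ pvGoA of that suffix
theorem pvAFold (label_ids : List Int) (divider lid_tokens : Int) :
    ∀ (ts : List Int) (i : Nat) (acc : List Int), label_ids.drop i = ts →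
      (PySem.List.enumerate ts (i : Int)).foldl (pvAStep label_ids divider lid_tokens) acc =
        acc ++ pvGoA divider lid_tokens ts := by
  intro ts
  induction ts with
  | nil => intro i acc h; simp [PySem.List.enumerate_nil, pvGoA]
  | cons t ts ih =>
    intro i acc h
    have hi : i < label_ids.length := by
      by_contra hge
      simp [List.drop_eq_nil_of_le (Nat.le_of_not_lt hge)] at h
    rw [PySem.List.enumerate_cons]
    simp only [List.foldl_cons]
    have hdrop' : label_ids.drop (i + 1) = ts := by
      have : label_ids.drop (i + 1) = (label_ids.drop i).drop 1 := by
        rw [List.drop_drop]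
      simp [this, h]
    have hstep : pvAStep label_ids divider lid_tokens acc ((i : Int), t) =
        acc ++ (match ts with
                | [] => [t]
                | u :: _ => if pvSide divider u != pvSide divider t then [t, lid_tokens] else [t]) := by
      cases ts with
      | nil =>
        have hlen : (i : Int) = (label_ids.length : Int) - 1 := by
          have : label_ids.length = i + 1 := by
            have := congrArg List.length hdrop'
            simp at this
            omega
          omega
        simp [pvAStep, hlen]
      | cons u us =>
        have hlt : i + 1 < label_ids.length := by
          have := congrArg List.length hdrop'
          simp at this
          omega
        have hne : ¬ ((i : Int) = (label_ids.length : Int) - 1) := by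
          omega
        have hgetu : label_ids[i+1]'hlt = u := by
          have h0 : (label_ids.drop (i+1))[0]? = some u := by simp [hdrop']
          rw [List.getElem?_drop] at h0
          simpa [List.getElem?_eq_getElem hlt] using h0
        have hpg : PySem.List.pyGetD label_ids ((i : Int) + 1) 0 = u := by
          have hc : ((i : Int) + 1) = ((i + 1 : Nat) : Int) := by omega
          rw [hc, PySem.List.pyGetD_natCast]
          simp [List.getD, List.getElem?_eq_getElem hlt, hgetu]
        simp only [pvAStep, hne, if_false, hpg]
        by_cases hs : pvSide divider u = pvSide divider t
        · simp [hs]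
        · have h1 : (pvSide divider t != pvSide divider u) = true := by
            simp [bne]; exact fun e => hs e.symm
          have h2 : (pvSide divider u != pvSide divider t) = true := by simp [bne, hs]
          simp [h1, h2]
    rw [hstep]
    have : ((i : Int) + 1) = ((i + 1 : Nat) : Int) := by omega
    rw [this, ih (i + 1) _ hdrop']
    cases ts with
    | nil => simp [pvGoA]
    | cons u us => simp [pvGoA]

-- ===== VERDICT (by name: the statement is the Claim_ definition above) =====
theorem get_lidcp_label_ids_spec : Claim_equal_get_lidcp_label_ids := by
  intro label_ids divider lid_tokens _hdom _hpre
  unfold Spec_get_lidcp_label_ids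
  cases label_ids with
  | nil => simp [get_lidcp_label_ids, get_lidcp_label_ids_alt]
  | cons t ts =>
    unfold get_lidcp_label_ids get_lidcp_label_ids_alt
    simp only [List.length_cons, Nat.succ_ne_zero, if_false]
    have hA := pvAFold (t :: ts) divider lid_tokens (t :: ts) 0 [] (by simp)
    simp only [Nat.cast_zero] at hA
    rw [hA, List.nil_append, pvGoA_eq_goTail]
    have hB := pvBRuns_join divider lid_tokens ts (pvSide divider t) [t]
    rcases hr : pvBRuns divider (pvSide divider t) [t] ts with _ | ⟨r, rs⟩
    · exact absurd hr (pvBRuns_ne_nil _ _ _ _)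
    · rw [hr] at hB
      simp only at hB
      show t :: pvGoTail divider lid_tokens (pvSide divider t) ts =
        rs.foldl (fun out run => out ++ lid_tokens :: run) r
      rw [PySem.List.foldl_append_eq_flatMap]
      simpa using hB.symm
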